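-- pv_equiv track=rewrite | github.com/PondSec/cloud | backend/app/auth/routes.py | _normalize_dock_order
-- ===== SOURCE A (Python) =====
-- from typing import Any
--
-- ALLOWED_DOCK_PATHS = [
--     "/app/home",
--     "/app/files",
--     "/app/search",
--     "/app/recents",
--     "/app/shared",
--     "/app/media",
--     "/dev/workspaces",
--     "/app/admin",
--     "/app/monitoring",
--     "/app/settings",
--     "/app/inventorypro",
-- ]
--
-- def _normalize_dock_order(value: Any) -> list[str]:
--     if not isinstance(value, list):
--         return list(ALLOWED_DOCK_PATHS)
--
--     seen: set[str] = set()
--     normalized: list[str] = []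
--     for entry in value:
--         if not isinstance(entry, str):
--             continue
--         path = entry.strip()
--         if path not in ALLOWED_DOCK_PATHS or path in seen:
--             continue
--         seen.add(path)
--         normalized.append(path)
--
--     for path in ALLOWED_DOCK_PATHS:
--         if path in seen:
--             continue
--         normalized.append(path)
--     return normalized
-- ===== SOURCE B (Python) =====
-- from typing import Any
--
-- ALLOWED_DOCK_PATHS = [
--     "/app/home",
--     "/app/files",
--     "/app/search",
--     "/app/recents",
--     "/app/shared",
--     "/app/media",
--     "/dev/workspaces",
--     "/app/admin",
--     "/app/monitoring",
--     "/app/settings",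
--     "/app/inventorypro",
-- ]
--
-- def _normalize_dock_order(value: Any) -> list[str]:
--     if not isinstance(value, list):
--         return list(ALLOWED_DOCK_PATHS)
--     candidates = [entry.strip() for entry in value
--                   if isinstance(entry, str) and entry.strip() in ALLOWED_DOCK_PATHS]
--     def sort_key(path: str) -> int:
--         if path in candidates:
--             return candidates.index(path)
--         return len(candidates) + ALLOWED_DOCK_PATHS.index(path)
--     return sorted(ALLOWED_DOCK_PATHS, key=sort_key)
-- ===== Notes on version B (the rewrite author's own statement) =====
-- stated objective: alternative
-- what changed: A builds the result with two appending loops over value and over ALLOWED_DOCK_PATHS with a 'seen' set; B instead collects the stripped allowed candidates in one comprehension and returns a single stable sort of ALLOWED_DOCK_PATHS keyed by first-appearance index (missing paths keyed after all present ones in canonical order).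
import Mathlib
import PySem

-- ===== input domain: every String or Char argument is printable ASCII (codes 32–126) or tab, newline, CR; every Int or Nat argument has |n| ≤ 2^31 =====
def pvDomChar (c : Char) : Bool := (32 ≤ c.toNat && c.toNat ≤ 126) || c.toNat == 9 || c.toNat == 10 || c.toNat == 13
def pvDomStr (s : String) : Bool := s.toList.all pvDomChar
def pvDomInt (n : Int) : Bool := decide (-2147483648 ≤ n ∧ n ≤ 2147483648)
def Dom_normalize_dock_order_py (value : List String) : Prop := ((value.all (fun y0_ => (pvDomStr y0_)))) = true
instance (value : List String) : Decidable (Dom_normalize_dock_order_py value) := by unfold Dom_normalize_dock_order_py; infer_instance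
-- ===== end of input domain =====

-- B replaces A's two appending loops (dedup loop over value + completion loop over ALLOWED_DOCK_PATHS)
-- by a single stable sort of ALLOWED_DOCK_PATHS keyed by first-appearance index; objective: alternative.

def pvAllowedDockPaths : List String :=
  ["/app/home", "/app/files", "/app/search", "/app/recents", "/app/shared",
   "/app/media", "/dev/workspaces", "/app/admin", "/app/monitoring",
   "/app/settings", "/app/inventorypro"]

-- ===== PORT A =====
-- (the Lean signature fixes value : List String, so the isinstance guards of the Python are always true)
def normalize_dock_order_py (value : List String) : List String :=
  let st := value.foldl (fun (st : PySem.Set String × List String) entry =>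
    let path := PySem.Str.strip entry
    if !(pvAllowedDockPaths.contains path) || st.1.contains path then st
    else (st.1.add path, st.2 ++ [path])) (PySem.Set.empty, [])
  pvAllowedDockPaths.foldl (fun normalized path =>
    if st.1.contains path then normalized else normalized ++ [path]) st.2

-- ===== PORT B =====
-- candidates = [entry.strip() for entry in value if entry.strip() in ALLOWED_DOCK_PATHS];
-- .index is List.idxOf (every call below is on a member, where Python's .index returns the same index)
def normalize_dock_order_py_alt (value : List String) : List String :=
  let candidates := (value.filter
      (fun entry => pvAllowedDockPaths.contains (PySem.Str.strip entry))).map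
      (fun entry => PySem.Str.strip entry)
  let sortKey := fun (path : String) =>
    if candidates.contains path then (candidates.idxOf path : Int)
    else ((candidates.length : Int) + (pvAllowedDockPaths.idxOf path : Int))
  PySem.List.sorted pvAllowedDockPaths sortKey

-- ===== PRECONDITION & SPEC =====
def Spec_normalize_dock_order_py (value : List String) (out : List String) : Prop := out = normalize_dock_order_py_alt value
instance (value : List String) (out : List String) : Decidable (Spec_normalize_dock_order_py value out) := by unfold Spec_normalize_dock_order_py; infer_instance

-- ===== CLAIM (what is proved, stated in full; the proofs are below) =====
def Claim_equal_normalize_dock_order_py : Prop := ∀ (value : List String), Dom_normalize_dock_order_py value → Spec_normalize_dock_order_py value (normalize_dock_order_py value)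

-- ===== LEMMAS AND PROOFS =====

-- the stripped allowed candidates and the first-occurrence dedup both programs revolve around
def pvCand (value : List String) : List String :=
  (value.filter (fun entry => pvAllowedDockPaths.contains (PySem.Str.strip entry))).map
    (fun entry => PySem.Str.strip entry)

-- A's first loop keeps seen = normalized (both grow by the same appends), and together they
-- compute the Set.add-fold over the candidates
theorem pv_first_loop (value : List String) (s : List String) :
    value.foldl (fun (st : PySem.Set String × List String) entry =>
      let path := PySem.Str.strip entry
      if !(pvAllowedDockPaths.contains path) || st.1.contains path then st
      else (st.1.add path, st.2 ++ [path])) (s, s)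
    = ((pvCand value).foldl PySem.Set.add s, (pvCand value).foldl PySem.Set.add s) := by
  induction value generalizing s with
  | nil => simp [pvCand]
  | cons e v ih =>
    by_cases hA : PySem.Str.strip e ∈ pvAllowedDockPaths
    · by_cases hs : PySem.Str.strip e ∈ s
      · simpa [pvCand, List.filter_cons, hA, hs, PySem.Set.add] using ih s
      · simpa [pvCand, List.filter_cons, hA, hs, PySem.Set.add] using ih (s ++ [PySem.Str.strip e])
    · simpa [pvCand, List.filter_cons, hA] using ih s

-- A computes: first-occurrence dedup of the candidates, then the missing allowed paths in order
theorem pv_A_eq (value : List String) :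
    normalize_dock_order_py value
    = PySem.Set.ofList (pvCand value)
      ++ pvAllowedDockPaths.filter (fun p => !((PySem.Set.ofList (pvCand value)).contains p)) := by
  unfold normalize_dock_order_py
  rw [show (PySem.Set.empty : PySem.Set String) = ([] : List String) from rfl]
  rw [pv_first_loop value []]
  show List.foldl (fun normalized path =>
      if (((pvCand value).foldl PySem.Set.add []).contains path) = true
      then normalized else normalized ++ [path])
      ((pvCand value).foldl PySem.Set.add []) pvAllowedDockPaths = _
  have hfun : (fun (normalized : List String) (path : String) =>
      if (((pvCand value).foldl PySem.Set.add []).contains path) = true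
      then normalized else normalized ++ [path])
      = (fun normalized path =>
        if (!(((pvCand value).foldl PySem.Set.add []).contains path)) = true
        then normalized ++ [(fun (x : String) => x) path] else normalized) := by
    funext n p
    by_cases h : (((pvCand value).foldl PySem.Set.add []).contains p) = true <;> simp
  rw [hfun, PySem.List.foldl_append_if _ (fun (x : String) => x)]
  simp [PySem.Set.ofList]

-- along a Nodup list, idxOf is strictly increasing
theorem pv_pairwise_idxOf (l : List String) (h : l.Nodup) :
    l.Pairwise (fun a b => l.idxOf a < l.idxOf b) := by
  induction l with
  | nil => exact List.Pairwise.nil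
  | cons a t ih =>
    rcases List.nodup_cons.mp h with ⟨ha, ht⟩
    refine List.Pairwise.cons ?_ ?_
    · intro b hb
      have hne : b ≠ a := fun he => ha (he ▸ hb)
      simp [Ne.symm hne]
    · refine (ih ht).imp_of_mem ?_
      intro x y hx hy hxy
      have hxa : x ≠ a := fun he => ha (he ▸ hx)
      have hya : y ≠ a := fun he => ha (he ▸ hy)
      simp [Ne.symm hxa, Ne.symm hya]
      omega

-- first-occurrence dedup is ordered by first-occurrence index
theorem pv_pairwise_ofList (C : List String) :
    (PySem.Set.ofList C).Pairwise (fun a b => C.idxOf a < C.idxOf b) := by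
  induction C using List.reverseRecOn with
  | nil => simp [PySem.Set.ofList]
  | append_singleton C x ih =>
    have hofl : PySem.Set.ofList (C ++ [x]) = (PySem.Set.ofList C).add x := by
      simp [PySem.Set.ofList]
    rw [hofl, PySem.Set.add]
    by_cases hx : (PySem.Set.ofList C).contains x = true
    · rw [if_pos hx]
      refine ih.imp_of_mem ?_
      intro a b hamem hbmem hab
      have haC : a ∈ C := (PySem.Set.mem_ofList C a).mp hamem
      have hbC : b ∈ C := (PySem.Set.mem_ofList C b).mp hbmem
      rw [List.idxOf_append_of_mem haC, List.idxOf_append_of_mem hbC]; exact hab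
    · rw [if_neg hx]
      rw [List.pairwise_append]
      have hxC : x ∉ C := by
        intro hc
        exact hx (by simpa using (PySem.Set.mem_ofList C x).mpr hc)
      refine ⟨?_, by simp, ?_⟩
      · refine ih.imp_of_mem ?_
        intro a b hamem hbmem hab
        have haC : a ∈ C := (PySem.Set.mem_ofList C a).mp hamem
        have hbC : b ∈ C := (PySem.Set.mem_ofList C b).mp hbmem
        rw [List.idxOf_append_of_mem haC, List.idxOf_append_of_mem hbC]; exact hab
      · intro a hamem b hbmem
        have haC : a ∈ C := (PySem.Set.mem_ofList C a).mp hamem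
        have hbx : b = x := by simpa using hbmem
        subst hbx
        rw [List.idxOf_append_of_mem haC, List.idxOf_append_of_notMem hxC]
        have := List.idxOf_lt_length_of_mem haC
        simp; omega

theorem pv_allowed_nodup : pvAllowedDockPaths.Nodup := by decide

-- B's stable sort produces exactly A's list
theorem pv_B_eq (value : List String) :
    normalize_dock_order_py_alt value
    = PySem.Set.ofList (pvCand value)
      ++ pvAllowedDockPaths.filter (fun p => !((PySem.Set.ofList (pvCand value)).contains p)) := by
  unfold normalize_dock_order_py_alt
  set C := pvCand value with hC
  have hCdef : (value.filter
      (fun entry => pvAllowedDockPaths.contains (PySem.Str.strip entry))).map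
      (fun entry => PySem.Str.strip entry) = C := rfl
  simp only [hCdef]
  set P := PySem.Set.ofList C with hP
  have hPsub : ∀ a ∈ P, a ∈ C := fun a ha => (PySem.Set.mem_ofList C a).mp ha
  have hCsub : ∀ a ∈ C, a ∈ pvAllowedDockPaths := by
    intro a ha
    rcases List.mem_map.mp ha with ⟨e, he, rfl⟩
    have := List.of_mem_filter he
    simpa using this
  apply PySem.List.sorted_eq_of_perm_of_pairwise_lt
  · -- the concatenation is a permutation of the allowed list
    have hnodup : (P ++ pvAllowedDockPaths.filter (fun p => !(P.contains p))).Nodup := by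
      rw [List.nodup_append]
      refine ⟨PySem.Set.nodup_ofList C, pv_allowed_nodup.filter _, ?_⟩
      intro a haP b hbF hab
      subst hab
      have : ¬ (a ∈ P) := by simpa using (List.of_mem_filter hbF)
      exact this haP
    refine (List.perm_ext_iff_of_nodup hnodup pv_allowed_nodup).mpr ?_
    intro a
    simp only [List.mem_append, List.mem_filter]
    constructor
    · rintro (h | ⟨h, _⟩)
      · exact hCsub a (hPsub a h)
      · exact h
    · intro h
      by_cases hp : a ∈ P
      · exact Or.inl hp
      · exact Or.inr ⟨h, by simpa using hp⟩
  · -- the sort key strictly increases along it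
    rw [List.pairwise_append]
    have hkeyP : ∀ a ∈ P, (if C.contains a then (C.idxOf a : Int)
        else ((C.length : Int) + (pvAllowedDockPaths.idxOf a : Int))) = (C.idxOf a : Int) := by
      intro a ha
      have hc : C.contains a = true := by simpa using hPsub a ha
      rw [if_pos hc]
    have hkeyM : ∀ b ∈ pvAllowedDockPaths.filter (fun p => !(P.contains p)),
        (if C.contains b then (C.idxOf b : Int)
        else ((C.length : Int) + (pvAllowedDockPaths.idxOf b : Int)))
        = (C.length : Int) + (pvAllowedDockPaths.idxOf b : Int) := by
      intro b hb
      have hbP : ¬ (b ∈ P) := by simpa using (List.of_mem_filter hb)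
      have hbC : ¬ b ∈ C := fun h => hbP ((PySem.Set.mem_ofList C b).mpr h)
      rw [if_neg (by simpa using hbC)]
    refine ⟨?_, ?_, ?_⟩
    · refine (pv_pairwise_ofList C).imp_of_mem ?_
      intro a b ha hb hab
      rw [hkeyP a ha, hkeyP b hb]
      exact_mod_cast hab
    · refine ((pv_pairwise_idxOf pvAllowedDockPaths pv_allowed_nodup).sublist
        List.filter_sublist).imp_of_mem ?_
      intro a b ha hb hab
      rw [hkeyM a ha, hkeyM b hb]
      omega
    · intro a ha b hb
      rw [hkeyP a ha, hkeyM b hb]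
      have h1 : C.idxOf a < C.length := List.idxOf_lt_length_of_mem (hPsub a ha)
      have h2 : (0 : Int) ≤ (pvAllowedDockPaths.idxOf b : Int) := Int.natCast_nonneg _
      omega

-- ===== VERDICT (by name: the statement is the Claim_ definition above) =====
theorem normalize_dock_order_py_spec : Claim_equal_normalize_dock_order_py := by
  intro value _
  unfold Spec_normalize_dock_order_py
  rw [pv_A_eq, pv_B_eq]
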